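-- pv_equiv track=rewrite | github.com/nhrade/AdventOfCodeSolutions2025 | day5.py | find_spoiled_and_fresh
-- ===== SOURCE A (Python) =====
-- def find_spoiled_and_fresh(ingredients, ranges):
--     fresh_ingredients = []
--     spoiled_ingredients = []
--     for ingredient in ingredients:
--         is_fresh = False
--         for r in ranges:
--             if ingredient >= r[0] and ingredient <= r[1]:
--                 fresh_ingredients.append(ingredient)
--                 is_fresh = True
--                 break
--         if not is_fresh:
--             spoiled_ingredients.append(ingredient)
--     return fresh_ingredients, spoiled_ingredients
-- ===== SOURCE B (Python) =====
-- def find_spoiled_and_fresh(ingredients, ranges):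
--     # Merge the ranges into disjoint intervals sorted by start, then decide
--     # each ingredient with a binary search over the interval starts.
--     merged = []
--     for s, e in sorted(ranges, key=lambda r: r[0]):
--         if merged and s <= merged[-1][1]:
--             last = merged[-1]
--             merged[-1] = (last[0], max(last[1], e))
--         else:
--             merged.append((s, e))
--     starts = [r[0] for r in merged]
--     fresh = []
--     spoiled = []
--     for x in ingredients:
--         lo, hi = 0, len(starts)
--         while lo < hi:  # bisect-right of x in starts
--             mid = (lo + hi) // 2
--             if x < starts[mid]:
--                 hi = mid
--             else:
--                 lo = mid + 1
--         if lo > 0 and x <= merged[lo - 1][1]: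
--             fresh.append(x)
--         else:
--             spoiled.append(x)
--     return fresh, spoiled
-- ===== Notes on version B (the rewrite author's own statement) =====
-- stated objective: faster
-- what changed: Instead of scanning the whole range list for every ingredient, B sorts the ranges by start once, merges them into disjoint intervals, and classifies each ingredient by a binary search over the interval starts.
import Mathlib
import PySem

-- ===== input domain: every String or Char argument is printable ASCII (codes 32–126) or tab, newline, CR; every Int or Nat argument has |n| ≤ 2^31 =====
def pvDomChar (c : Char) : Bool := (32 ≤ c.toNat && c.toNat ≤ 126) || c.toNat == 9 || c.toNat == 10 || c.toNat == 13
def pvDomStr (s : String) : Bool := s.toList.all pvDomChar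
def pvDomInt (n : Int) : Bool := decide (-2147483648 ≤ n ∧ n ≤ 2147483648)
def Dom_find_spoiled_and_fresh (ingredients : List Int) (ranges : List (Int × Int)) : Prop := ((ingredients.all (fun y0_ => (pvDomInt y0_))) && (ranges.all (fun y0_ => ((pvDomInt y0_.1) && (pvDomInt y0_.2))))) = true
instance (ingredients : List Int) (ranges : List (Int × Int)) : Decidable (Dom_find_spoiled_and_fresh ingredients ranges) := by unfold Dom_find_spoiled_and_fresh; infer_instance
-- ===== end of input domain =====

-- B replaces A's per-ingredient scan of all ranges by sort + interval merge + binary search (faster).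

-- ===== PORT A =====
-- inner 'for r in ranges: … break': returns is_fresh (the append at the break
-- point is performed by the caller according to this flag)
def pvAInner (x : Int) : List (Int × Int) → Bool
  | [] => false
  | r :: rs => if r.1 ≤ x ∧ x ≤ r.2 then true else pvAInner x rs

def pvALoop (ranges : List (Int × Int)) : List Int → List Int → List Int → List Int × List Int
  | [], fresh, spoiled => (fresh, spoiled)
  | x :: xs, fresh, spoiled =>
    if pvAInner x ranges then pvALoop ranges xs (fresh ++ [x]) spoiled
    else pvALoop ranges xs fresh (spoiled ++ [x])

def find_spoiled_and_fresh (ingredients : List Int) (ranges : List (Int × Int)) : List Int × List Int :=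
  pvALoop ranges ingredients [] []

-- ===== PORT B =====
-- one step of the merging loop: merged[-1] is acc.getLast?
def pvMergeStep (acc : List (Int × Int)) (r : Int × Int) : List (Int × Int) :=
  match acc.getLast? with
  | some last => if r.1 ≤ last.2 then acc.dropLast ++ [(last.1, max last.2 r.2)] else acc ++ [r]
  | none => acc ++ [r]

-- the classification loop; the hand-written while loop in Source B is exactly the
-- lo/hi bisect-right recursion PySem.List.bisectRight
def pvBLoop (merged : List (Int × Int)) (starts : List Int) :
    List Int → List Int → List Int → List Int × List Int
  | [], fresh, spoiled => (fresh, spoiled)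
  | x :: xs, fresh, spoiled =>
    let lo := PySem.List.bisectRight starts x
    if 0 < lo ∧ x ≤ (merged.getD (lo - 1) (0, 0)).2 then pvBLoop merged starts xs (fresh ++ [x]) spoiled
    else pvBLoop merged starts xs fresh (spoiled ++ [x])

def find_spoiled_and_fresh_alt (ingredients : List Int) (ranges : List (Int × Int)) : List Int × List Int :=
  let merged := (PySem.List.sorted ranges (fun r => r.1) false).foldl pvMergeStep []
  let starts := merged.map (fun r => r.1)
  pvBLoop merged starts ingredients [] []

-- ===== PRECONDITION & SPEC =====
def Spec_find_spoiled_and_fresh (ingredients : List Int) (ranges : List (Int × Int)) (out : List Int × List Int) : Prop := out = find_spoiled_and_fresh_alt ingredients ranges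
instance (ingredients : List Int) (ranges : List (Int × Int)) (out : List Int × List Int) : Decidable (Spec_find_spoiled_and_fresh ingredients ranges out) := by unfold Spec_find_spoiled_and_fresh; infer_instance

-- ===== CLAIM (what is proved, stated in full; the proofs are below) =====
def Claim_equal_find_spoiled_and_fresh : Prop := ∀ (ingredients : List Int) (ranges : List (Int × Int)), Dom_find_spoiled_and_fresh ingredients ranges → Spec_find_spoiled_and_fresh ingredients ranges (find_spoiled_and_fresh ingredients ranges)

-- ===== LEMMAS AND PROOFS =====

-- x is covered by some range of rs
def pvCovers (x : Int) (rs : List (Int × Int)) : Bool :=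
  rs.any (fun r => decide (r.1 ≤ x) && decide (x ≤ r.2))

lemma pvAInner_eq_covers (x : Int) (rs : List (Int × Int)) : pvAInner x rs = pvCovers x rs := by
  induction rs with
  | nil => rfl
  | cons r rs ih =>
    simp only [pvAInner, pvCovers, List.any_cons] at *
    by_cases h : r.1 ≤ x ∧ x ≤ r.2 <;> simp [h, ih, pvCovers]

lemma pvALoop_eq (ranges : List (Int × Int)) (xs f s : List Int) :
    pvALoop ranges xs f s =
      (f ++ xs.filter (fun x => pvAInner x ranges),
       s ++ xs.filter (fun x => !pvAInner x ranges)) := by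
  induction xs generalizing f s with
  | nil => simp [pvALoop]
  | cons x xs ih =>
    by_cases h : pvAInner x ranges = true <;>
      simp [pvALoop, h, ih, List.filter_cons]

-- B's test for a single ingredient
def pvBTest (merged : List (Int × Int)) (starts : List Int) (x : Int) : Bool :=
  let lo := PySem.List.bisectRight starts x
  decide (0 < lo ∧ x ≤ (merged.getD (lo - 1) (0, 0)).2)

lemma pvBLoop_eq (merged : List (Int × Int)) (starts : List Int) (xs f s : List Int) :
    pvBLoop merged starts xs f s =
      (f ++ xs.filter (fun x => pvBTest merged starts x),
       s ++ xs.filter (fun x => !pvBTest merged starts x)) := by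
  induction xs generalizing f s with
  | nil => simp [pvBLoop]
  | cons x xs ih =>
    simp only [pvBLoop]
    split_ifs with h
    · have hb : pvBTest merged starts x = true := decide_eq_true h
      rw [ih]; simp [hb]
    · have hb : pvBTest merged starts x = false := decide_eq_false h
      rw [ih]; simp [hb]

-- the invariant on the merged list: gaps between consecutive intervals and
-- weakly increasing starts
def pvInv (l : List (Int × Int)) : Prop :=
  List.IsChain (fun a b => a.2 < b.1) l ∧ l.Pairwise (fun a b => a.1 ≤ b.1)

-- one merging step preserves the invariant, keeps all starts ≤ r.1, and the
-- union of covered points grows by exactly the interval r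
lemma pvMergeStep_spec (acc : List (Int × Int)) (r : Int × Int)
    (hinv : pvInv acc) (hge : ∀ a ∈ acc, a.1 ≤ r.1) :
    pvInv (pvMergeStep acc r) ∧
      (∀ a ∈ pvMergeStep acc r, a.1 ≤ r.1) ∧
      ∀ x, pvCovers x (pvMergeStep acc r) =
        (pvCovers x acc || (decide (r.1 ≤ x) && decide (x ≤ r.2))) := by
  obtain ⟨hch, hpw⟩ := hinv
  rcases List.eq_nil_or_concat acc with hnil | ⟨init, a, hconcat⟩
  · subst hnil
    have hr : pvMergeStep [] r = [r] := rfl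
    exact ⟨⟨by simp [hr], by simp [hr]⟩, by simp [hr], fun x => by simp [hr, pvCovers]⟩
  · rw [List.concat_eq_append] at hconcat
    subst hconcat
    have hgl : (init ++ [a]).getLast? = some a := by simp
    have hdl : (init ++ [a]).dropLast = init := by simp
    have ha1 : a.1 ≤ r.1 := hge a (by simp)
    rw [List.isChain_append] at hch
    obtain ⟨hch1, -, hch3⟩ := hch
    rw [List.pairwise_append] at hpw
    obtain ⟨hpw1, -, hpw3⟩ := hpw
    by_cases hm : r.1 ≤ a.2
    · have hstep : pvMergeStep (init ++ [a]) r = init ++ [(a.1, max a.2 r.2)] := by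
        simp [pvMergeStep, hgl, hdl, hm]
      rw [hstep]
      refine ⟨⟨?_, ?_⟩, ?_, ?_⟩
      · refine List.IsChain.append hch1 (by simp) ?_
        intro p hp q hq
        simp only [List.head?_cons, Option.mem_def, Option.some.injEq] at hq
        subst hq
        exact hch3 p hp a (by simp)
      · rw [List.pairwise_append]
        refine ⟨hpw1, by simp, ?_⟩
        intro p hp q hq
        simp only [List.mem_singleton] at hq
        subst hq
        exact hpw3 p hp a (by simp)
      · intro p hp
        rcases List.mem_append.mp hp with h | h
        · exact le_trans (hpw3 p h a (by simp)) ha1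
        · simp only [List.mem_singleton] at h
          subst h
          exact ha1
      · intro x
        simp only [pvCovers, List.any_append, List.any_cons, List.any_nil, Bool.or_false]
        rcases hb : List.any init (fun r => decide (r.1 ≤ x) && decide (x ≤ r.2)) with _ | _
        · rw [Bool.eq_iff_iff]
          simp only [Bool.false_or, Bool.or_eq_true, Bool.and_eq_true, decide_eq_true_eq]
          constructor <;> intro h <;> omega
        · simp
    · have hstep : pvMergeStep (init ++ [a]) r = (init ++ [a]) ++ [r] := by
        simp [pvMergeStep, hgl, hm]
      rw [hstep]
      rw [not_le] at hm
      refine ⟨⟨?_, ?_⟩, ?_, ?_⟩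
      · refine List.IsChain.append (List.IsChain.append hch1 (by simp) hch3) (by simp) ?_
        intro p hp q hq
        rw [hgl] at hp
        simp only [Option.mem_def, Option.some.injEq, List.head?_cons] at hp hq
        subst hq
        subst hp
        exact hm
      · rw [List.pairwise_append]
        refine ⟨List.pairwise_append.mpr ⟨hpw1, by simp, hpw3⟩, by simp, ?_⟩
        intro p hp q hq
        simp only [List.mem_singleton] at hq
        subst hq
        exact hge p hp
      · intro p hp
        rcases List.mem_append.mp hp with h | h
        · exact hge p h
        · simp only [List.mem_singleton] at h
          subst h
          exact le_refl _
      · intro x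
        simp [pvCovers, List.any_append, Bool.or_assoc]

lemma pvMerge_fold (l : List (Int × Int)) :
    ∀ acc : List (Int × Int), pvInv acc →
      l.Pairwise (fun a b => a.1 ≤ b.1) →
      (∀ r ∈ l, ∀ a ∈ acc, a.1 ≤ r.1) →
      pvInv (l.foldl pvMergeStep acc) ∧
        ∀ x, pvCovers x (l.foldl pvMergeStep acc) = (pvCovers x acc || pvCovers x l) := by
  induction l with
  | nil => intro acc hinv _ _; exact ⟨hinv, by simp [pvCovers]⟩
  | cons r l ih =>
    intro acc hinv hpw hge
    obtain ⟨hinv', hle', hcov'⟩ := pvMergeStep_spec acc r hinv (fun a ha => hge r (by simp) a ha)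
    rw [List.pairwise_cons] at hpw
    have := ih (pvMergeStep acc r) hinv' hpw.2
      (fun r' hr' a ha => le_trans (hle' a ha) (hpw.1 r' hr'))
    refine ⟨by simpa using this.1, ?_⟩
    intro x
    rw [List.foldl_cons, this.2 x, hcov' x]
    simp [pvCovers, Bool.or_assoc]

lemma pvBTest_eq_covers (merged : List (Int × Int)) (h : pvInv merged) (x : Int) :
    pvBTest merged (merged.map (fun r => r.1)) x = pvCovers x merged := by
  obtain ⟨hch, hpw⟩ := h
  have hsorted : (merged.map (fun r => r.1)).Pairwise (· ≤ ·) := by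
    rw [List.pairwise_map]; exact hpw
  obtain ⟨hjle, hlt, hgt⟩ := PySem.List.bisectRight_spec (merged.map (fun r => r.1)) x hsorted
  set j := PySem.List.bisectRight (merged.map (fun r => r.1)) x with hj
  rw [List.length_map] at hjle
  have hcov : pvCovers x merged = true ↔
      ∃ i, ∃ hi : i < merged.length, merged[i].1 ≤ x ∧ x ≤ merged[i].2 := by
    simp only [pvCovers, List.any_eq_true]
    constructor
    · rintro ⟨r, hr, hcond⟩
      obtain ⟨i, hi, hri⟩ := List.mem_iff_getElem.mp hr
      exact ⟨i, hi, by simp at hcond; rw [hri]; exact hcond⟩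
    · rintro ⟨i, hi, h1, h2⟩
      exact ⟨merged[i], by simp, by simp [h1, h2]⟩
  have hstart : ∀ i (hi : i < merged.length), i < j → merged[i].1 ≤ x := by
    intro i hi hij
    have := hlt i (by simpa using hi) hij
    simpa using this
  have hstart' : ∀ i (hi : i < merged.length), j ≤ i → x < merged[i].1 := by
    intro i hi hij
    have := hgt i (by simpa using hi) hij
    simpa using this
  rcases Nat.eq_zero_or_pos j with hj0 | hjpos
  · have hfalse : pvCovers x merged = false := by
      rw [Bool.eq_false_iff]
      intro hc
      obtain ⟨i, hi, h1, _⟩ := hcov.mp hc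
      exact absurd h1 (not_le.mpr (hstart' i hi (by omega)))
    simp [pvBTest, ← hj, hfalse, hj0]
  · have hj1 : j - 1 < merged.length := by omega
    have hgetD : merged[j - 1]?.getD (0, 0) = merged[j - 1] := by
      rw [List.getElem?_eq_getElem hj1]
      rfl
    have hs : merged[j - 1].1 ≤ x := hstart (j - 1) hj1 (by omega)
    by_cases he : x ≤ merged[j - 1].2
    · have htrue : pvCovers x merged = true := hcov.mpr ⟨j - 1, hj1, hs, he⟩
      simp [pvBTest, ← hj, htrue, hgetD, hjpos, he]
    · have hfalse : pvCovers x merged = false := by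
        rw [Bool.eq_false_iff]
        intro hc
        obtain ⟨i, hi, h1, h2⟩ := hcov.mp hc
        rcases lt_or_ge i j with hij | hij
        · rcases Nat.lt_or_ge i (j - 1) with hilt | hieq
          · -- merged[i].2 < merged[i+1].1 ≤ merged[j-1].1 ≤ x
            have hchain : merged[i].2 < merged[i + 1].1 := by
              rw [List.isChain_iff_getElem] at hch
              exact hch i (by omega)
            have hmono : merged[i + 1].1 ≤ merged[j - 1].1 := by
              rcases Nat.lt_or_ge (i + 1) (j - 1) with hlt2 | hge2
              · exact (List.pairwise_iff_getElem.mp hpw) (i + 1) (j - 1) (by omega) hj1 hlt2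
              · have heq : i + 1 = j - 1 := by omega
                simp [heq]
            omega
          · have heq : i = j - 1 := by omega
            subst heq
            exact he h2
        · exact absurd h1 (not_le.mpr (hstart' i hi hij))
      simp [pvBTest, ← hj, hfalse, hgetD]
      intro _
      omega

-- ===== VERDICT (by name: the statement is the Claim_ definition above) =====
theorem find_spoiled_and_fresh_spec : Claim_equal_find_spoiled_and_fresh := by
  intro ingredients ranges _
  unfold Spec_find_spoiled_and_fresh find_spoiled_and_fresh find_spoiled_and_fresh_alt
  have hsort : (PySem.List.sorted ranges (fun r => r.1) false).Pairwise (fun a b => a.1 ≤ b.1) :=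
    PySem.List.sorted_pairwise ranges (fun r => r.1)
  have hfold := pvMerge_fold (PySem.List.sorted ranges (fun r => r.1) false) []
    ⟨List.IsChain.nil, List.Pairwise.nil⟩ hsort (by intro r _ a ha; simp at ha)
  obtain ⟨hinv, hcov⟩ := hfold
  have hperm : (PySem.List.sorted ranges (fun r => r.1) false).Perm ranges :=
    PySem.List.sorted_perm ranges (fun r => r.1) false
  rw [pvALoop_eq, pvBLoop_eq]
  have htest : ∀ x, pvAInner x ranges =
      pvBTest ((PySem.List.sorted ranges (fun r => r.1) false).foldl pvMergeStep [])
        (((PySem.List.sorted ranges (fun r => r.1) false).foldl pvMergeStep []).map (fun r => r.1)) x := by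
    intro x
    rw [pvAInner_eq_covers, pvBTest_eq_covers _ hinv, hcov]
    simp [pvCovers, hperm.any_eq]
  simp only [htest]
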